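-- pv_equiv track=rewrite | github.com/thomas9911/pokeren | pokeren_python/main.py | _count_hand
-- ===== SOURCE A (Python) =====
-- VALUES = ["2", "3", "4", "5", "6", "7", "8", "9", "T", "J", "Q", "K", "A"]
--
-- _VALUE_KEY = 1
--
-- def _sorted_indexes(hand):
--     hand_values = sorted((x[_VALUE_KEY] for x in hand), key=VALUES.index)
--     indexes = [VALUES.index(x) for x in hand_values]
--     return indexes
--
-- def _count_hand(hand):
--     indexes = _sorted_indexes(hand)
--     histogram = {}
--     for item in indexes:
--         if item not in histogram:
--             histogram[item] = 1
--         else: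
--             histogram[item] += 1
--     return histogram
-- ===== SOURCE B (Python) =====
-- VALUES = ["2", "3", "4", "5", "6", "7", "8", "9", "T", "J", "Q", "K", "A"]
--
--
-- def _count_hand(hand):
--     # Scan the VALUES domain in order: keys come out ascending with no sort.
--     histogram = {}
--     for i, v in enumerate(VALUES):
--         c = sum(1 for card in hand if card[1] == v)
--         if c:
--             histogram[i] = c
--     return histogram
-- ===== Notes on version B (the rewrite author's own statement) =====
-- stated objective: alternative
-- what changed: B drops the sort-by-index and the insertion-order dict loop: it scans the fixed VALUES domain in ascending index order once, counting each value directly in the hand, so keys come out ascending without sorting the hand.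
import Mathlib
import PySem

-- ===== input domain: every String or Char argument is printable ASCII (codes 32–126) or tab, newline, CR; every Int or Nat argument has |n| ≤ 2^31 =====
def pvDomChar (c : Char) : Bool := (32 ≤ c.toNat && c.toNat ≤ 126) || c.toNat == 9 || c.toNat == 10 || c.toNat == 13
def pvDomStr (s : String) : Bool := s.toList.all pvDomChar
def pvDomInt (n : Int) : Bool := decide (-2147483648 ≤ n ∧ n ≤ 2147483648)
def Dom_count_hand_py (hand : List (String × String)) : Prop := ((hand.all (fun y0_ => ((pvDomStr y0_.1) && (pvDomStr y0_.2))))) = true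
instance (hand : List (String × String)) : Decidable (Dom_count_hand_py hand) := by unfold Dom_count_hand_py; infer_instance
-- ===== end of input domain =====

-- B scans the fixed VALUES domain in ascending index order, counting each value in the hand,
-- instead of A's sort-by-index + insertion-order dict loop; same return value on Pre_.

-- ===== PORT A =====
def pvValues : List String := ["2", "3", "4", "5", "6", "7", "8", "9", "T", "J", "Q", "K", "A"]

-- VALUES.index(x); exact where x ∈ pvValues (Pre_ guarantees that; Python raises ValueError otherwise)
def pvIdx (x : String) : Int := (((PySem.List.index? pvValues x).getD 0 : Nat) : Int)

def pvSortedIndexes (hand : List (String × String)) : List Int :=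
  let hand_values := PySem.List.sorted (hand.map (fun x => x.2)) pvIdx false
  hand_values.map pvIdx

def count_hand_py (hand : List (String × String)) : List (Int × Int) :=
  (let indexes := pvSortedIndexes hand
   indexes.foldl
     (fun histogram item =>
       if histogram.contains item = false then histogram.insert item 1
       else histogram.insert item (histogram.getD item 0 + 1))
     PySem.Dict.empty).items

-- ===== PORT B =====
def count_hand_py_alt (hand : List (String × String)) : List (Int × Int) :=
  ((PySem.List.enumerate pvValues 0).foldl
    (fun histogram p =>
      -- c = sum(1 for card in hand if card[1] == v)
      let c : Int := hand.foldl (fun acc card => if card.2 == p.2 then acc + 1 else acc) 0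
      if c != 0 then histogram.insert p.1 c else histogram)
    PySem.Dict.empty).items

-- ===== PRECONDITION & SPEC =====
-- Pre_ excludes exactly the hands containing a card whose value string is not in VALUES:
-- there Python A raises ValueError (VALUES.index fails).
def Pre_count_hand_py (hand : List (String × String)) : Prop :=
  ∀ card ∈ hand, card.2 ∈ pvValues
instance (hand : List (String × String)) : Decidable (Pre_count_hand_py hand) := by
  unfold Pre_count_hand_py; infer_instance

def pvWitness_count_hand_py : (List (String × String)) :=
  [("H", "A"), ("S", "A"), ("D", "2"), ("C", "T"), ("H", "2")]

def Spec_count_hand_py (hand : List (String × String)) (out : List (Int × Int)) : Prop := out = count_hand_py_alt hand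
instance (hand : List (String × String)) (out : List (Int × Int)) : Decidable (Spec_count_hand_py hand out) := by unfold Spec_count_hand_py; infer_instance

-- ===== CLAIM (what is proved, stated in full; the proofs are below) =====
def Claim_equal_count_hand_py : Prop := ∀ (hand : List (String × String)), Dom_count_hand_py hand → Pre_count_hand_py hand → Spec_count_hand_py hand (count_hand_py hand)

-- ===== LEMMAS AND PROOFS =====

-- A's loop body is the canonical counting insert, so A's dict is Counter(indexes)
theorem a_fold_eq_counter (indexes : List Int) :
    indexes.foldl
      (fun histogram item =>
        if histogram.contains item = false then histogram.insert item 1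
        else histogram.insert item (histogram.getD item 0 + 1))
      PySem.Dict.empty = PySem.Dict.counter indexes := by
  rw [← PySem.Dict.foldl_insert_getD_add_one_eq_counter]
  apply PySem.List.foldl_congr_mem
  intro d x _
  by_cases h : d.contains x = true
  · simp [h]
  · simp only [Bool.not_eq_true] at h
    rw [PySem.Dict.getD_of_not_contains (h := h)]
    simp [h]

theorem a_eq (hand : List (String × String)) :
    count_hand_py hand =
      (PySem.Set.ofList (pvSortedIndexes hand)).map
        (fun k => (k, ((pvSortedIndexes hand).count k : Int))) := by
  unfold count_hand_py
  rw [a_fold_eq_counter, PySem.Dict.items_counter]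

-- B's inner generator-sum is the count of the value in the hand
theorem cnt_foldl (hand : List (String × String)) (v : String) :
    hand.foldl (fun acc card => if card.2 == v then acc + 1 else acc) (0:Int)
      = ((hand.map (fun x => x.2)).count v : Int) := by
  rw [← List.foldl_map (f := fun x : String × String => x.2)
        (g := fun (acc : Int) x => if x == v then acc + 1 else acc),
      PySem.List.foldl_beq_add_one, zero_add]

theorem b_eq (hand : List (String × String)) :
    count_hand_py_alt hand =
      ((PySem.List.enumerate pvValues 0).filter
        (fun p => ((hand.map (fun x => x.2)).count p.2 : Int) != 0)).map
        (fun p => (p.1, ((hand.map (fun x => x.2)).count p.2 : Int))) := by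
  unfold count_hand_py_alt
  have h1 : (fun (histogram : PySem.Dict Int Int) (p : Int × String) =>
        let c : Int := hand.foldl (fun acc card => if card.2 == p.2 then acc + 1 else acc) 0
        if c != 0 then histogram.insert p.1 c else histogram)
      = fun histogram p =>
        if ((hand.map (fun x => x.2)).count p.2 : Int) != 0
        then histogram.insert p.1 ((hand.map (fun x => x.2)).count p.2 : Int)
        else histogram := by
    funext d p
    simp only [cnt_foldl]
  rw [h1, PySem.List.foldl_if_eq_foldl_filter,
      PySem.Dict.items_foldl_insert_fresh (k := fun p : Int × String => p.1)
        (v := fun p : Int × String => ((hand.map (fun x => x.2)).count p.2 : Int))]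
  · rfl
  · intro a _
    simp [PySem.Dict.contains_empty]
  · exact ((((PySem.List.pairwise_lt_enumerate pvValues 0).filter _).map
      (R := fun a b : Int × String => a.1 < b.1) _ (fun _ _ h => h)).imp ne_of_lt)

-- dedup (Set.ofList) preserves any Pairwise relation
theorem ofList_pairwise {α : Type} [BEq α] [LawfulBEq α] {r : α → α → Prop}
    (xs : List α) (h : xs.Pairwise r) : (PySem.Set.ofList xs).Pairwise r := by
  induction xs with
  | nil => simp [PySem.Set.ofList_nil]
  | cons x t ih =>
    rw [List.pairwise_cons] at h
    rw [PySem.Set.ofList_cons]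
    refine List.Pairwise.cons ?_ ?_
    · intro y hy
      have hmem : y ∈ PySem.Set.ofList t := List.mem_of_mem_filter hy
      exact h.1 y ((PySem.Set.mem_ofList _ _).1 hmem)
    · exact (ih h.2).filter _

-- index facts over the literal VALUES table
theorem fact1 : ∀ v ∈ pvValues, (pvIdx v, v) ∈ PySem.List.enumerate pvValues 0 := by decide
theorem fact2 : ∀ p ∈ PySem.List.enumerate pvValues 0, pvIdx p.2 = p.1 := by decide
theorem fact3 : ∀ v ∈ pvValues, ∀ p ∈ PySem.List.enumerate pvValues 0,
    (pvIdx v == p.1) = (v == p.2) := by decide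

theorem count_map_eq (l : List String) (f : String → Int) (b : Int) :
    (l.map f).count b = l.countP (fun a => f a == b) := by
  simp [List.count, List.countP_map, Function.comp_def, BEq.comm]

theorem strict_sorted_eq (l₁ l₂ : List Int)
    (h₁ : l₁.Pairwise (· ≤ ·)) (h₂ : l₂.Pairwise (· ≤ ·))
    (n₁ : l₁.Nodup) (n₂ : l₂.Nodup) (hm : ∀ x, x ∈ l₁ ↔ x ∈ l₂) : l₁ = l₂ :=
  ((List.perm_ext_iff_of_nodup n₁ n₂).2 hm).eq_of_pairwise
    (fun _ _ _ _ hab hba => le_antisymm hab hba) h₁ h₂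

-- ===== VERDICT (by name: the statement is the Claim_ definition above) =====
theorem count_hand_py_spec : Claim_equal_count_hand_py := by
  intro hand _ hpre
  unfold Spec_count_hand_py
  rw [a_eq, b_eq]
  have hvals : ∀ v ∈ hand.map (fun x => x.2), v ∈ pvValues := by
    intro v hv
    obtain ⟨card, hc, rfl⟩ := List.mem_map.1 hv
    exact hpre card hc
  have hTdef : pvSortedIndexes hand
      = (PySem.List.sorted (hand.map (fun x => x.2)) pvIdx false).map pvIdx := rfl
  have hperm : (pvSortedIndexes hand).Perm ((hand.map (fun x => x.2)).map pvIdx) := by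
    rw [hTdef]
    exact (PySem.List.sorted_perm _ _ _).map pvIdx
  have hcount : ∀ k, (pvSortedIndexes hand).count k
      = ((hand.map (fun x => x.2)).map pvIdx).count k := fun k => hperm.count_eq k
  have hbridge : ∀ p ∈ PySem.List.enumerate pvValues 0,
      ((hand.map (fun x => x.2)).map pvIdx).count p.1 = (hand.map (fun x => x.2)).count p.2 := by
    intro p hp
    rw [count_map_eq]
    have : (hand.map (fun x => x.2)).countP (fun a => pvIdx a == p.1)
        = (hand.map (fun x => x.2)).countP (fun a => a == p.2) :=
      List.countP_congr (fun v hv => by rw [fact3 v (hvals v hv) p hp])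
    rw [this]
    rfl
  -- the two key lists are the same strictly increasing list
  have hL : PySem.Set.ofList (pvSortedIndexes hand)
      = ((PySem.List.enumerate pvValues 0).filter
          (fun p => ((hand.map (fun x => x.2)).count p.2 : Int) != 0)).map (fun p => p.1) := by
    have hTsort : (pvSortedIndexes hand).Pairwise (· ≤ ·) := by
      rw [hTdef]; exact PySem.List.sorted_map_key_pairwise _ _
    have h₁ := ofList_pairwise _ hTsort
    have n₁ := PySem.Set.nodup_ofList (xs := pvSortedIndexes hand)
    have h₂lt : (((PySem.List.enumerate pvValues 0).filter
        (fun p => ((hand.map (fun x => x.2)).count p.2 : Int) != 0)).map (fun p => p.1)).Pairwise (· < ·) :=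
      (((PySem.List.pairwise_lt_enumerate pvValues 0).filter _).map
        (R := fun a b : Int × String => a.1 < b.1) _ (fun _ _ h => h))
    refine strict_sorted_eq _ _ h₁ (h₂lt.imp le_of_lt) n₁ (h₂lt.imp ne_of_lt) ?_
    intro k
    rw [PySem.Set.mem_ofList, hperm.mem_iff]
    constructor
    · intro hk
      obtain ⟨v, hv, rfl⟩ := List.mem_map.1 hk
      refine List.mem_map.2 ⟨(pvIdx v, v), List.mem_filter.2 ⟨fact1 v (hvals v hv), ?_⟩, rfl⟩
      simp only [bne_iff_ne, ne_eq, Int.natCast_eq_zero]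
      exact (List.count_pos_iff.2 hv).ne'
    · intro hk
      obtain ⟨p, hp, rfl⟩ := List.mem_map.1 hk
      obtain ⟨hpe, hq⟩ := List.mem_filter.1 hp
      have hmem : p.2 ∈ hand.map (fun x => x.2) := by
        simp only [bne_iff_ne, ne_eq, Int.natCast_eq_zero] at hq
        exact List.count_pos_iff.1 (Nat.pos_of_ne_zero hq)
      exact List.mem_map.2 ⟨p.2, hmem, fact2 p hpe⟩
  rw [hL, List.map_map]
  refine List.map_congr_left ?_
  intro p hp
  have hpe := (List.mem_filter.1 hp).1
  simp only [Function.comp_apply]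
  rw [← hbridge p hpe, ← hcount]
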